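-- pv_equiv track=rewrite | github.com/allenai/PathNet | pathnet/data/data_utils.py | pack_span_idxs
-- ===== SOURCE A (Python) =====
-- from typing import List, Tuple, Dict, Any
--
-- def pack_span_idxs(span_locs: List[List[List[Tuple[int, int]]]]):
--     """
--     packing of span indices
--     :param span_locs: C * P * L * 2
--     :return:
--     """
--     all_span_locs = sum(sum(span_locs, []), [])  # CPL * 2
--     loc_tracks = []
--     for cidx, c in enumerate(span_locs):
--         for pidx, p in enumerate(c):
--             for lidx, l in enumerate(p):
--                 loc_tracks.append([cidx, pidx, lidx])
--     return all_span_locs, loc_tracks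
-- ===== SOURCE B (Python) =====
-- def pack_span_idxs(span_locs):
--     """Single fused triple loop building both outputs in one pass."""
--     all_span_locs = []
--     loc_tracks = []
--     for cidx, c in enumerate(span_locs):
--         for pidx, p in enumerate(c):
--             for lidx, l in enumerate(p):
--                 all_span_locs.append(l)
--                 loc_tracks.append([cidx, pidx, lidx])
--     return all_span_locs, loc_tracks
-- ===== Notes on version B (the rewrite author's own statement) =====
-- stated objective: faster
-- what changed: Replaces A's double sum-based flatten (quadratic repeated list concatenation) plus a separate nested track-building loop with one fused triple loop that appends each span and its index track in a single pass.
import Mathlib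
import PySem

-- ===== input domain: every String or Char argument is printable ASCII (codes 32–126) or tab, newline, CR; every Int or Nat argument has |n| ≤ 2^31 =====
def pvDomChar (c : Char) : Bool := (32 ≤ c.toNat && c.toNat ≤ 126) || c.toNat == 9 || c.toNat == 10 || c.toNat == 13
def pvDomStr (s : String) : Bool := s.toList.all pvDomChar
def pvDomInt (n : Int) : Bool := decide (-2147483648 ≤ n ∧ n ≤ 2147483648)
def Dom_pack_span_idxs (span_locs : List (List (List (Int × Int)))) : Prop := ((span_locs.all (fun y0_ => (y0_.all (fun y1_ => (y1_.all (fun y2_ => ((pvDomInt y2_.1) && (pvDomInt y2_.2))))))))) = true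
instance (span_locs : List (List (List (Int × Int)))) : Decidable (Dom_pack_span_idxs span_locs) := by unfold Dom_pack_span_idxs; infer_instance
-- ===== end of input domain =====

-- B fuses A's sum-based double flatten and separate nested track loop into one triple loop building both outputs in a single pass, avoiding repeated whole-list concatenation.


-- ===== PORT A =====
-- sum(xs, []) is a left fold of list concatenation starting from []
def pack_span_idxs (span_locs : List (List (List (Int × Int)))) : (List (Int × Int)) × List (List Int) :=
  let all_span_locs : List (Int × Int) :=
    ((span_locs.foldl (· ++ ·) ([] : List (List (Int × Int)))).foldl (· ++ ·) ([] : List (Int × Int)))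
  let loc_tracks : List (List Int) :=
    (PySem.List.enumerate span_locs 0).foldl (fun acc cp =>
      (PySem.List.enumerate cp.2 0).foldl (fun acc pp =>
        (PySem.List.enumerate pp.2 0).foldl (fun acc lp =>
          acc ++ [[cp.1, pp.1, lp.1]]) acc) acc) []
  (all_span_locs, loc_tracks)

-- ===== PORT B =====
def pack_span_idxs_alt (span_locs : List (List (List (Int × Int)))) : (List (Int × Int)) × List (List Int) :=
  (PySem.List.enumerate span_locs 0).foldl (fun st cp =>
    (PySem.List.enumerate cp.2 0).foldl (fun st pp =>
      (PySem.List.enumerate pp.2 0).foldl (fun st lp =>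
        (st.1 ++ [lp.2], st.2 ++ [[cp.1, pp.1, lp.1]])) st) st)
    (([] : List (Int × Int)), ([] : List (List Int)))

-- ===== PRECONDITION & SPEC =====
def Spec_pack_span_idxs (span_locs : List (List (List (Int × Int)))) (out : (List (Int × Int)) × List (List Int)) : Prop := out = pack_span_idxs_alt span_locs
instance (span_locs : List (List (List (Int × Int)))) (out : (List (Int × Int)) × List (List Int)) : Decidable (Spec_pack_span_idxs span_locs out) := by unfold Spec_pack_span_idxs; infer_instance

-- ===== CLAIM (what is proved, stated in full; the proofs are below) =====
def Claim_equal_pack_span_idxs : Prop := ∀ (span_locs : List (List (List (Int × Int)))), Dom_pack_span_idxs span_locs → Spec_pack_span_idxs span_locs (pack_span_idxs span_locs)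

-- ===== LEMMAS AND PROOFS =====

-- dropping the indices of an enumeration before a flatMap that ignores them
theorem flatMap_snd_enumerate {a b : Type} (f : a → List b) (xs : List a) (s : Int) :
    (PySem.List.enumerate xs s).flatMap (fun pp => f pp.2) = xs.flatMap f := by
  induction xs generalizing s with
  | nil => simp
  | cons h t ih => rw [PySem.List.enumerate_cons]; simp [ih]

-- B's innermost fold: appends the spans of ps and one track per span
theorem inner_B (ci pi : Int) (ps : List (Int × (Int × Int)))
    (st : List (Int × Int) × List (List Int)) :
    ps.foldl (fun st lp => (st.1 ++ [lp.2], st.2 ++ [[ci, pi, lp.1]])) st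
      = (st.1 ++ ps.map (·.2), st.2 ++ ps.map (fun lp => [ci, pi, lp.1])) := by
  induction ps generalizing st with
  | nil => simp
  | cons h t ih => simp [List.foldl_cons, ih]

-- B's middle fold over an enumerated context
theorem mid_B (ci : Int) (ps : List (Int × List (Int × Int)))
    (st : List (Int × Int) × List (List Int)) :
    ps.foldl (fun st pp =>
        (PySem.List.enumerate pp.2 0).foldl (fun st lp =>
          (st.1 ++ [lp.2], st.2 ++ [[ci, pp.1, lp.1]])) st) st
      = (st.1 ++ ps.flatMap (fun pp => pp.2),
         st.2 ++ ps.flatMap (fun pp => (PySem.List.enumerate pp.2 0).map (fun lp => [ci, pp.1, lp.1]))) := by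
  induction ps generalizing st with
  | nil => simp
  | cons h t ih =>
      rw [List.foldl_cons, inner_B, ih]
      simp [PySem.List.map_snd_enumerate]

-- B's outer fold
theorem outer_B (ps : List (Int × List (List (Int × Int))))
    (st : List (Int × Int) × List (List Int)) :
    ps.foldl (fun st cp =>
        (PySem.List.enumerate cp.2 0).foldl (fun st pp =>
          (PySem.List.enumerate pp.2 0).foldl (fun st lp =>
            (st.1 ++ [lp.2], st.2 ++ [[cp.1, pp.1, lp.1]])) st) st) st
      = (st.1 ++ ps.flatMap (fun cp => cp.2.flatMap (fun p => p)),
         st.2 ++ ps.flatMap (fun cp => (PySem.List.enumerate cp.2 0).flatMap (fun pp =>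
            (PySem.List.enumerate pp.2 0).map (fun lp => [cp.1, pp.1, lp.1])))) := by
  induction ps generalizing st with
  | nil => simp
  | cons h t ih =>
      rw [List.foldl_cons, mid_B, ih]
      simp [flatMap_snd_enumerate (fun (p : List (Int × Int)) => p) h.2 0]

-- A's innermost track fold
theorem inner_A (ci pi : Int) (ps : List (Int × (Int × Int))) (acc : List (List Int)) :
    ps.foldl (fun acc lp => acc ++ [[ci, pi, lp.1]]) acc
      = acc ++ ps.map (fun lp => [ci, pi, lp.1]) := by
  induction ps generalizing acc with
  | nil => simp
  | cons h t ih => simp [List.foldl_cons, ih]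

-- A's middle track fold
theorem mid_A (ci : Int) (ps : List (Int × List (Int × Int))) (acc : List (List Int)) :
    ps.foldl (fun acc pp =>
        (PySem.List.enumerate pp.2 0).foldl (fun acc lp => acc ++ [[ci, pp.1, lp.1]]) acc) acc
      = acc ++ ps.flatMap (fun pp => (PySem.List.enumerate pp.2 0).map (fun lp => [ci, pp.1, lp.1])) := by
  induction ps generalizing acc with
  | nil => simp
  | cons h t ih =>
      rw [List.foldl_cons, inner_A, ih]
      simp

-- A's outer track fold
theorem outer_A (ps : List (Int × List (List (Int × Int)))) (acc : List (List Int)) :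
    ps.foldl (fun acc cp =>
        (PySem.List.enumerate cp.2 0).foldl (fun acc pp =>
          (PySem.List.enumerate pp.2 0).foldl (fun acc lp => acc ++ [[cp.1, pp.1, lp.1]]) acc) acc) acc
      = acc ++ ps.flatMap (fun cp => (PySem.List.enumerate cp.2 0).flatMap (fun pp =>
          (PySem.List.enumerate pp.2 0).map (fun lp => [cp.1, pp.1, lp.1]))) := by
  induction ps generalizing acc with
  | nil => simp
  | cons h t ih =>
      rw [List.foldl_cons, mid_A, ih]
      simp [List.flatMap_def]

-- Python's sum(xs, []) is a left fold of append
theorem foldl_append_eq_flatten {a : Type} (xs : List (List a)) (acc : List a) :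
    xs.foldl (· ++ ·) acc = acc ++ xs.flatten := by
  induction xs generalizing acc with
  | nil => simp
  | cons h t ih => simp [List.foldl_cons, ih]

-- A's double sum-flatten equals the nested flatMap B produces
theorem flatten_A (span_locs : List (List (List (Int × Int)))) :
    ((span_locs.foldl (· ++ ·) ([] : List (List (Int × Int)))).foldl (· ++ ·) ([] : List (Int × Int)))
      = span_locs.flatMap (fun c => c.flatMap (fun p => p)) := by
  rw [foldl_append_eq_flatten, foldl_append_eq_flatten]
  simp only [List.nil_append]
  induction span_locs with
  | nil => simp
  | cons h t ih => simp [List.flatten_append, ih, List.flatMap_def]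

-- ===== VERDICT (by name: the statement is the Claim_ definition above) =====
theorem pack_span_idxs_spec : Claim_equal_pack_span_idxs := by
  intro span_locs _
  unfold Spec_pack_span_idxs pack_span_idxs pack_span_idxs_alt
  rw [outer_B, outer_A, flatten_A]
  have hl := flatMap_snd_enumerate (fun (c : List (List (Int × Int))) => c.flatMap (fun p => p)) span_locs 0
  simp at hl
  simp [hl]
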